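-- pv_equiv track=rewrite | github.com/jovanvuleta/leetcoding | leetcode/easy/matrix/delete_greates_value_in_each_row__2500.py | deleteGreatestValueSecond
-- ===== SOURCE A (Python) =====
-- from typing import List
--
-- def deleteGreatestValueSecond(grid: List[List[int]]) -> int:
--     res = 0
--
--     for j in range(len(grid[0])):
--         curr_max = 0
--         for i in range(len(grid)):
--             row_max = max(grid[i])
--             curr_max = max(curr_max, row_max)
--             max_index = grid[i].index(row_max)
--             grid[i][max_index] = 0
--
--         res += curr_max
--
--     return res
-- ===== SOURCE B (Python) =====
-- def deleteGreatestValueSecond(grid):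
--     # Return-value equivalent to A (which mutates grid in place; B does not mutate).
--     cols = len(grid[0])
--     tops = []
--     for row in grid:
--         tops.append(sorted([x for x in row if x > 0], reverse=True))
--     res = 0
--     for k in range(cols):
--         best = 0
--         for t in tops:
--             v = t[k] if k < len(t) else 0
--             if v > best:
--                 best = v
--         res += best
--     return res
-- ===== Notes on version B (the rewrite author's own statement) =====
-- stated objective: faster
-- what changed: A re-scans every row to find and zero out its max once per column (O(rows*cols^2) with in-place mutation); B sorts each row's positive values descending once and sums, per deletion round k, the largest k-th entry across rows, with no mutation and no repeated scans.
import Mathlib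
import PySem

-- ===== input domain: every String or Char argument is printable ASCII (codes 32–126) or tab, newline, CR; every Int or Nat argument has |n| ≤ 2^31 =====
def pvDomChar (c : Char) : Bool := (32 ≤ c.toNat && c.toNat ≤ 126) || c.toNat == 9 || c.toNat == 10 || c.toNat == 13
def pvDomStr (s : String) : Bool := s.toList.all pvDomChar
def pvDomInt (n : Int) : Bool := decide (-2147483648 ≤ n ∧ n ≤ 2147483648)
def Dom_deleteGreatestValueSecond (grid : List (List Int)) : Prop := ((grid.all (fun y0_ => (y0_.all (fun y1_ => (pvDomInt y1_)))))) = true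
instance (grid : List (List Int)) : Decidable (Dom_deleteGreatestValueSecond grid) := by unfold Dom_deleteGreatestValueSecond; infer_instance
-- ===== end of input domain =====

-- B replaces A's repeated row-max-and-zero passes by sorting each row's positive values once
-- (descending) and summing, per deletion round, the best k-th value across rows; equivalence is
-- about the RETURN value only: Python A zeroes out entries of `grid` in place, B does not mutate.

-- ===== PORT A =====
-- max(row): Python raises ValueError on an empty row; those inputs are excluded by Pre_.
def pvRowMax (r : List Int) : Int := (PySem.List.max? r (fun x => x)).getD 0

-- body of A's inner `for i in range(len(grid))` loop; state = (grid, curr_max)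
def pvAInner (st : List (List Int) × Int) (i : Int) : List (List Int) × Int :=
  let row := (PySem.List.pyGet? st.1 i).getD []
  let rowMax := pvRowMax row
  let currMax := max st.2 rowMax
  let maxIndex := (PySem.List.index? row rowMax).getD 0
  -- grid[i][max_index] = 0  (i comes from range(len(grid)), hence 0 ≤ i < len: set i.toNat is exact)
  (st.1.set i.toNat (row.set maxIndex 0), currMax)

-- body of A's outer `for j in range(len(grid[0]))` loop; state = (grid, res)
def pvAOuter (st : List (List Int) × Int) (_j : Int) : List (List Int) × Int :=
  let inner := (PySem.List.pyRange 0 st.1.length 1).foldl pvAInner (st.1, 0)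
  (inner.1, st.2 + inner.2)

def deleteGreatestValueSecond (grid : List (List Int)) : Int :=
  ((PySem.List.pyRange 0 ((PySem.List.pyGet? grid 0).getD []).length 1).foldl pvAOuter (grid, 0)).2

-- ===== PORT B =====
-- body of B's inner `for t in tops` loop: v = t[k] if k < len(t) else 0; if v > best: best = v
def pvBBest (tops : List (List Int)) (k : Int) : Int :=
  tops.foldl (fun best t =>
    let v := if k < (t.length : Int) then (PySem.List.pyGet? t k).getD 0 else 0
    if best < v then v else best) 0

def deleteGreatestValueSecond_alt (grid : List (List Int)) : Int :=
  let cols := ((PySem.List.pyGet? grid 0).getD []).length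
  let tops := grid.foldl
    (fun acc row => acc ++ [PySem.List.sorted (row.filter (fun x => decide (0 < x))) (fun x => x) true]) []
  (PySem.List.pyRange 0 cols 1).foldl (fun res k => res + pvBBest tops k) 0

-- ===== PRECONDITION & SPEC =====
-- Pre_ excludes exactly the inputs where Python A raises: the empty grid (IndexError on grid[0])
-- and grids with a nonempty first row but some empty row (ValueError from max([])).
def Pre_deleteGreatestValueSecond (grid : List (List Int)) : Prop :=
  grid ≠ [] ∧ (grid.headI ≠ [] → ∀ r ∈ grid, r ≠ [])
instance (grid : List (List Int)) : Decidable (Pre_deleteGreatestValueSecond grid) := by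
  unfold Pre_deleteGreatestValueSecond; infer_instance
def pvWitness_deleteGreatestValueSecond : List (List Int) := [[1, 2], [3, 4]]

def Spec_deleteGreatestValueSecond (grid : List (List Int)) (out : Int) : Prop :=
  out = deleteGreatestValueSecond_alt grid
instance (grid : List (List Int)) (out : Int) : Decidable (Spec_deleteGreatestValueSecond grid out) := by
  unfold Spec_deleteGreatestValueSecond; infer_instance

-- ===== CLAIM (what is proved, stated in full; the proofs are below) =====
def Claim_equal_deleteGreatestValueSecond : Prop :=
  ∀ (grid : List (List Int)), Dom_deleteGreatestValueSecond grid →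
    Pre_deleteGreatestValueSecond grid →
    Spec_deleteGreatestValueSecond grid (deleteGreatestValueSecond grid)

-- ===== LEMMAS AND PROOFS =====

-- one row-max-deletion step: replace the first occurrence of the row's max by 0
def pvT (r : List Int) : List Int := r.set ((PySem.List.index? r (pvRowMax r)).getD 0) 0
-- the row's positive values, sorted descending (what B precomputes per row)
def pvS (r : List Int) : List Int :=
  PySem.List.sorted (r.filter (fun x => decide (0 < x))) (fun x => x) true

lemma pvDecomp (r : List Int) (hr : r ≠ []) :
    ∃ pre suf, r = pre ++ pvRowMax r :: suf ∧ pvT r = pre ++ 0 :: suf ∧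
      (PySem.List.max? r (fun x => x)) = some (pvRowMax r) := by
  obtain ⟨m, hm⟩ : ∃ m, PySem.List.max? r (fun x => x) = some m := by
    rcases h : PySem.List.max? r (fun x => x) with _ | m
    · exact absurd ((PySem.List.max?_eq_none_iff r _).mp h) hr
    · exact ⟨m, rfl⟩
  have hmax : pvRowMax r = m := by simp [pvRowMax, hm]
  have hmem : m ∈ r := PySem.List.max?_mem hm
  obtain ⟨idx, hidx⟩ : ∃ k, PySem.List.index? r m = some k :=
    Option.isSome_iff_exists.mp ((PySem.List.index?_isSome_iff r m).mpr hmem)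
  obtain ⟨pre, suf, hrps, hlen, -⟩ := (PySem.List.index?_eq_some_iff r m idx).mp hidx
  refine ⟨pre, suf, by rw [hmax]; exact hrps, ?_, by rw [hmax]; exact hm⟩
  rw [pvT, hmax, hidx, Option.getD_some, hrps, List.set_append, ← hlen]
  simp

lemma pvS_key (r : List Int) (hr : r ≠ []) :
    (pvRowMax r ≤ 0 ∧ pvS r = [] ∧ pvS (pvT r) = []) ∨
    (0 < pvRowMax r ∧ ∃ rest, pvS r = pvRowMax r :: rest ∧ pvS (pvT r) = rest) := by
  obtain ⟨pre, suf, hrps, hT, hm⟩ := pvDecomp r hr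
  set m := pvRowMax r
  have hle : ∀ y ∈ r, y ≤ m := PySem.List.max?_isMax hm
  by_cases hm0 : m ≤ 0
  · left
    refine ⟨hm0, ?_, ?_⟩
    · have h1 : r.filter (fun x => decide (0 < x)) = [] :=
        List.filter_eq_nil_iff.mpr (fun x hx => by
          have := hle x hx; simp; omega)
      rw [pvS, h1]; exact (PySem.List.sorted_eq_nil_iff _ _ _).mpr rfl
    · have h1 : (pvT r).filter (fun x => decide (0 < x)) = [] :=
        List.filter_eq_nil_iff.mpr (fun x hx => by
          rw [hT] at hx
          simp only [List.mem_append, List.mem_cons] at hx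
          have hxr : x ≤ m ∨ x = 0 := by
            rcases hx with h | h | h
            · exact Or.inl (hle x (by rw [hrps]; exact List.mem_append.mpr (Or.inl h)))
            · exact Or.inr h
            · exact Or.inl (hle x (by rw [hrps]; exact List.mem_append.mpr (Or.inr (List.mem_cons_of_mem _ h))))
          simp; omega)
      rw [pvS, h1]; exact (PySem.List.sorted_eq_nil_iff _ _ _).mpr rfl
  · right
    replace hm0 : 0 < m := by omega
    have hfr : r.filter (fun x => decide (0 < x)) =
        pre.filter (fun x => decide (0 < x)) ++ m :: suf.filter (fun x => decide (0 < x)) := by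
      rw [hrps]; simp [List.filter_append, hm0]
    have hfT : (pvT r).filter (fun x => decide (0 < x)) =
        pre.filter (fun x => decide (0 < x)) ++ suf.filter (fun x => decide (0 < x)) := by
      rw [hT]; simp [List.filter_append]
    set rest := pre.filter (fun x => decide (0 < x)) ++ suf.filter (fun x => decide (0 < x)) with hrest
    refine ⟨hm0, PySem.List.sorted rest (fun x => x) true, ?_, ?_⟩
    · refine List.Perm.eq_of_pairwise (fun a b _ _ h1 h2 => by omega)
        (PySem.List.sorted_pairwise_rev _ _) ?_ ?_
      · constructor
        · intro y hy
          have hy' : y ∈ rest := (PySem.List.sorted_perm rest _ true).mem_iff.mp hy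
          have : y ∈ r := by
            rw [hrest] at hy'
            rw [hrps]
            rcases List.mem_append.mp hy' with h | h
            · exact List.mem_append.mpr (Or.inl (List.mem_of_mem_filter h))
            · exact List.mem_append.mpr (Or.inr (List.mem_cons_of_mem _ (List.mem_of_mem_filter h)))
          exact hle y this
        · exact PySem.List.sorted_pairwise_rev _ _
      · refine ((PySem.List.sorted_perm _ _ _).trans ?_).trans
          ((PySem.List.sorted_perm rest _ true).symm.cons m)
        rw [hfr]
        exact List.perm_middle
    · rw [pvS, hfT]

lemma pvT_ne_nil (r : List Int) (hr : r ≠ []) : pvT r ≠ [] := by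
  intro h
  have := congrArg List.length h
  simp [pvT] at this
  exact hr this

lemma pvIter (r : List Int) (hr : r ≠ []) (k : Nat) :
    max 0 (pvRowMax (pvT^[k] r)) = (pvS r).getD k 0 := by
  induction k generalizing r with
  | zero =>
    rcases pvS_key r hr with ⟨h0, hS, -⟩ | ⟨h0, rest, hS, -⟩
    · simp [hS]; omega
    · simp [hS]; omega
  | succ k ih =>
    rw [Function.iterate_succ_apply]
    rw [ih (pvT r) (pvT_ne_nil r hr)]
    rcases pvS_key r hr with ⟨-, hS, hST⟩ | ⟨-, rest, hS, hST⟩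
    · simp [hS, hST]
    · simp [hS, hST]

lemma pvInner (g : List (List Int)) (n : Nat) (hn : n ≤ g.length) :
    (PySem.List.pyRange 0 (n : Int) 1).foldl pvAInner (g, 0) =
      ((g.take n).map pvT ++ g.drop n,
       ((g.take n).map pvRowMax).foldl (fun c x => max c x) 0) := by
  induction n with
  | zero => simp [show PySem.List.pyRange 0 0 1 = [] from rfl]
  | succ n ih =>
    have hn' : n ≤ g.length := by omega
    have hlt : n < g.length := by omega
    have hcast : ((n + 1 : Nat) : Int) = (n : Int) + 1 := by push_cast; ring
    rw [hcast, PySem.List.pyRange_one_succ_right (by positivity), List.foldl_append,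
      ih hn']
    have hlenA : ((g.take n).map pvT).length = n := by simp [hn']
    have hrow : (PySem.List.pyGet? ((g.take n).map pvT ++ g.drop n) (n : Int)).getD [] = g[n] := by
      rw [PySem.List.pyGet?_natCast, List.getElem?_append_right (by omega), hlenA]
      simp [List.getElem?_drop]
      rw [List.getElem?_eq_getElem hlt]
      rfl
    have hset : (((g.take n).map pvT ++ g.drop n).set n (pvT g[n])) =
        (g.take (n+1)).map pvT ++ g.drop (n+1) := by
      rw [List.set_append, if_neg (by omega), hlenA, Nat.sub_self,
        List.drop_eq_getElem_cons hlt, List.set_cons_zero,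
        ← List.take_concat_get hlt, List.concat_eq_append, List.map_append]
      simp
    have h2 : List.foldl (fun c x => max c x) 0 (List.map pvRowMax (List.take (n+1) g)) =
        max (List.foldl (fun c x => max c x) 0 (List.map pvRowMax (List.take n g))) (pvRowMax g[n]) := by
      rw [← List.take_concat_get hlt, List.concat_eq_append, List.map_append, List.foldl_append]
      rfl
    show pvAInner _ _ = _
    rw [pvAInner]
    simp only [hrow]
    rw [Int.toNat_natCast,
      show (g[n].set ((PySem.List.index? g[n] (pvRowMax g[n])).getD 0) 0) = pvT g[n] from rfl,
      hset, h2]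

lemma pvOuterStep (g : List (List Int)) (res : Int) (j : Int) :
    pvAOuter (g, res) j =
      (g.map pvT, res + (g.map pvRowMax).foldl (fun c x => max c x) 0) := by
  rw [pvAOuter]
  show (_ , _) = _
  rw [pvInner g g.length le_rfl]
  simp

lemma pvOuter (g : List (List Int)) (t : Nat) (res : Int) :
    (PySem.List.pyRange 0 (t : Int) 1).foldl pvAOuter (g, res) =
      ((List.map pvT)^[t] g,
       res + ∑ k ∈ Finset.range t,
         (((List.map pvT)^[k] g).map pvRowMax).foldl (fun c x => max c x) 0) := by
  induction t with
  | zero => simp [show PySem.List.pyRange 0 0 1 = [] from rfl]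
  | succ t ih =>
    have hcast : ((t + 1 : Nat) : Int) = (t : Int) + 1 := by push_cast; ring
    rw [hcast, PySem.List.pyRange_one_succ_right (by positivity), List.foldl_append, ih,
      List.foldl_cons, List.foldl_nil, pvOuterStep, Finset.sum_range_succ,
      Function.iterate_succ_apply']
    ring_nf

lemma pvSumRange (f : Int → Int) (t : Nat) (init : Int) :
    (PySem.List.pyRange 0 (t : Int) 1).foldl (fun res k => res + f k) init =
      init + ∑ k ∈ Finset.range t, f (k : Int) := by
  induction t generalizing init with
  | zero => simp [show PySem.List.pyRange 0 0 1 = [] from rfl]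
  | succ t ih =>
    have hcast : ((t + 1 : Nat) : Int) = (t : Int) + 1 := by push_cast; ring
    rw [hcast, PySem.List.pyRange_one_succ_right (by positivity), List.foldl_append, ih,
      List.foldl_cons, List.foldl_nil, Finset.sum_range_succ]
    ring_nf

lemma pvGetIf (t : List Int) (k : Nat) :
    (if ((k : Int) : Int) < (t.length : Int) then (PySem.List.pyGet? t (k : Int)).getD 0 else 0) =
      t.getD k 0 := by
  split_ifs with h
  · have hk : k < t.length := by exact_mod_cast h
    rw [PySem.List.pyGet?_natCast, List.getElem?_eq_getElem hk]
    simp [List.getD_eq_getElem?_getD, List.getElem?_eq_getElem hk]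
  · have hk : t.length ≤ k := by omega
    simp [List.getD_eq_getElem?_getD, List.getElem?_eq_none_iff.mpr hk]

lemma pvBBest_eq (g : List (List Int)) (k : Nat) :
    pvBBest (g.map pvS) (k : Int) =
      g.foldl (fun c r => max c ((pvS r).getD k 0)) 0 := by
  rw [pvBBest, List.foldl_map]
  congr 1
  funext best r
  show (if _ then _ else _) = _
  rw [pvGetIf (pvS r) k]
  split_ifs <;> omega

lemma pvMapIter (n : Nat) (g : List (List Int)) :
    (List.map pvT)^[n] g = g.map pvT^[n] := by
  induction n generalizing g with
  | zero => simp
  | succ n ih =>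
    rw [Function.iterate_succ_apply, ih, List.map_map, ← Function.iterate_succ]


lemma pvFoldAgree (g : List (List Int)) (k : Nat) (c : Int) (hc : 0 ≤ c)
    (hne : ∀ r ∈ g, r ≠ []) :
    g.foldl (fun c r => max c (pvRowMax (pvT^[k] r))) c =
      g.foldl (fun c r => max c ((pvS r).getD k 0)) c := by
  induction g generalizing c with
  | nil => rfl
  | cons r rs ih =>
    have hr := hne r (by simp)
    have hkey : max c ((pvS r).getD k 0) = max c (pvRowMax (pvT^[k] r)) := by
      rw [← pvIter r hr k]
      omega
    show List.foldl _ (max c _) rs = List.foldl _ (max c _) rs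
    rw [hkey]
    exact ih _ (by omega) (fun r h => hne r (by simp [h]))

-- ===== VERDICT (by name: the statement is the Claim_ definition above) =====
theorem deleteGreatestValueSecond_spec : Claim_equal_deleteGreatestValueSecond := by
  intro grid _ hpre
  obtain ⟨hne, hrows⟩ := hpre
  unfold Spec_deleteGreatestValueSecond
  cases grid with
  | nil => exact absurd rfl hne
  | cons r0 gs =>
    have hget0 : (PySem.List.pyGet? (r0 :: gs) 0).getD [] = r0 := by
      rw [show (0 : Int) = ((0 : Nat) : Int) from rfl, PySem.List.pyGet?_natCast]
      rfl
    rw [deleteGreatestValueSecond, deleteGreatestValueSecond_alt]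
    simp only [hget0, PySem.List.foldl_append_singleton_eq_map, List.nil_append]
    rw [show (fun x : List Int =>
        PySem.List.sorted (List.filter (fun x => decide (0 < x)) x) (fun x => x) true) = pvS
      from rfl]
    rw [pvOuter (r0 :: gs) r0.length 0,
      pvSumRange (fun k => pvBBest ((r0 :: gs).map pvS) k) r0.length 0, zero_add, zero_add]
    dsimp only
    rcases eq_or_ne r0 [] with h0 | h0
    · subst h0; rfl
    · have hner : ∀ r ∈ r0 :: gs, r ≠ [] := hrows h0
      refine Finset.sum_congr rfl (fun k _ => ?_)
      rw [pvMapIter, List.map_map, List.foldl_map, pvBBest_eq]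
      exact pvFoldAgree (r0 :: gs) k 0 le_rfl hner
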